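-- pv_equiv track=rewrite | github.com/bbi-lab/bbi-sciatac-demux | samplesheet/sciatac_samplesheet.py | get_wrap_groups
-- ===== SOURCE A (Python) =====
-- def get_wrap_groups( row_out_list ):
--   wrap_groups_dict = {}
--   for irow, row_out in enumerate(row_out_list):
--     # Gather wrap_group values in wrap_groups_dict.
--     # Does this sample have a wrap group value?
--     if( row_out.get( 'wrap_group' ) != None and row_out['wrap_group'] != '' ):
--       if( wrap_groups_dict.get( row_out['wrap_group'] ) == None ):
--         wrap_groups_dict[row_out['wrap_group']] = [ row_out['sample_name'] ]
--       elif( row_out['sample_name'] not in wrap_groups_dict[row_out['wrap_group']] ):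
--         wrap_groups_dict[row_out['wrap_group']].append( row_out['sample_name'] )
--   return( wrap_groups_dict )
-- ===== SOURCE B (Python) =====
-- def get_wrap_groups(row_out_list):
--     # Flatten to (wrap_group, sample_name) pairs for the qualifying rows,
--     # then build the grouping with comprehensions: keys in first-occurrence
--     # order, each group's names deduplicated preserving first occurrence.
--     pairs = [(r['wrap_group'], r['sample_name']) for r in row_out_list
--              if r.get('wrap_group') != None and r['wrap_group'] != '']
--     return {wg: list(dict.fromkeys(n for g, n in pairs if g == wg))
--             for wg in dict.fromkeys(g for g, _ in pairs)}
-- ===== Notes on version B (the rewrite author's own statement) =====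
-- stated objective: alternative
-- what changed: A builds the grouped dict in one stateful loop with a three-way case split (new key / duplicate name / append); B first flattens the qualifying rows into (wrap_group, sample_name) pairs, then constructs the result declaratively by comprehension: first-occurrence-ordered keys via dict.fromkeys, and each group's names as an ordered dedup of a filter over the pair list.
import Mathlib
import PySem

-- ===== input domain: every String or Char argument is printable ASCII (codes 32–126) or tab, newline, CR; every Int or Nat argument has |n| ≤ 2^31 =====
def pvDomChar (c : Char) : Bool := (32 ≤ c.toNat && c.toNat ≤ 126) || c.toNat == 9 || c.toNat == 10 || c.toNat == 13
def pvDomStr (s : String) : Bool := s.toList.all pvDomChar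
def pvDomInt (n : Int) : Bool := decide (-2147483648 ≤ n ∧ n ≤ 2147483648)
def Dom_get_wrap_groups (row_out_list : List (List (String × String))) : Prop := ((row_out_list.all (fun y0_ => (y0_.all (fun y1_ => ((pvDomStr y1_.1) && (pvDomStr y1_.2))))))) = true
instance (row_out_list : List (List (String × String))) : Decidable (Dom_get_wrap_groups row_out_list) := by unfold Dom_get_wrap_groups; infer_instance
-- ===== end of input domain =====

-- B replaces A's stateful grouping loop by a flatten-to-pairs pass followed by a declarative
-- comprehension build (objective: alternative decomposition, no speed claim).

-- ===== PORT A =====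
-- one iteration of A's loop body (row_out.get returns none where Python's dict.get returns None;
-- row_out['sample_name'] is only reached under Pre_, where the key exists: getD "" is never the value used)
def stepA (d : PySem.Dict String (List String)) (row_out : List (String × String)) :
    PySem.Dict String (List String) :=
  match (PySem.Dict.mk row_out).get? "wrap_group" with
  | none => d
  | some wg =>
    if wg = "" then d
    else
      match d.get? wg with
      | none => d.insert wg [((PySem.Dict.mk row_out).get? "sample_name").getD ""]
      | some names =>
        if ((PySem.Dict.mk row_out).get? "sample_name").getD "" ∈ names then d
        else d.insert wg (names ++ [((PySem.Dict.mk row_out).get? "sample_name").getD ""])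

def get_wrap_groups (row_out_list : List (List (String × String))) : List (String × List String) :=
  (row_out_list.foldl stepA PySem.Dict.empty).items

-- ===== PORT B =====
-- the filter/map of B's pair comprehension, for one row: some (wrap_group, sample_name) for a
-- qualifying row, none otherwise ('sample_name' is only looked up under Pre_: getD "" never used)
def rowPair (r : List (String × String)) : Option (String × String) :=
  match (PySem.Dict.mk r).get? "wrap_group" with
  | none => none
  | some wg =>
    if wg = "" then none
    else some (wg, ((PySem.Dict.mk r).get? "sample_name").getD "")

def get_wrap_groups_alt (row_out_list : List (List (String × String))) : List (String × List String) :=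
  let pairs := row_out_list.filterMap rowPair
  (PySem.List.dedup (pairs.map Prod.fst)).map
    (fun wg => (wg, PySem.List.dedup ((pairs.filter (fun q => q.1 == wg)).map Prod.snd)))

-- ===== PRECONDITION & SPEC =====
-- Pre_ excludes exactly the rows where Python (A and B alike) raises KeyError: a row whose
-- wrap_group is present and non-empty but which has no sample_name key.
def Pre_get_wrap_groups (row_out_list : List (List (String × String))) : Prop :=
  (row_out_list.all (fun row_out =>
    match (PySem.Dict.mk row_out).get? "wrap_group" with
    | none => true
    | some wg => wg == "" || (PySem.Dict.mk row_out).contains "sample_name")) = true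
instance (row_out_list : List (List (String × String))) : Decidable (Pre_get_wrap_groups row_out_list) := by
  unfold Pre_get_wrap_groups; infer_instance

def pvWitness_get_wrap_groups : (List (List (String × String))) :=
  [[("wrap_group", "g1"), ("sample_name", "a")],
   [("wrap_group", "")],
   [("sample_name", "b")],
   [("wrap_group", "g1"), ("sample_name", "a")]]

def Spec_get_wrap_groups (row_out_list : List (List (String × String))) (out : List (String × List String)) : Prop := out = get_wrap_groups_alt row_out_list
instance (row_out_list : List (List (String × String))) (out : List (String × List String)) : Decidable (Spec_get_wrap_groups row_out_list out) := by unfold Spec_get_wrap_groups; infer_instance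

-- ===== CLAIM (what is proved, stated in full; the proofs are below) =====
def Claim_equal_get_wrap_groups : Prop := ∀ (row_out_list : List (List (String × String))), Dom_get_wrap_groups row_out_list → Pre_get_wrap_groups row_out_list → Spec_get_wrap_groups row_out_list (get_wrap_groups row_out_list)

-- ===== LEMMAS AND PROOFS =====

-- the pair-level grouping step: d[wg] = set-append sn to d.get(wg, [])
def stepP (d : PySem.Dict String (List String)) (p : String × String) :
    PySem.Dict String (List String) :=
  d.modify p.1 [] (fun ns => PySem.Set.add ns p.2)

theorem stepP_eq_insert (d : PySem.Dict String (List String)) (p : String × String) :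
    stepP d p = d.insert p.1 (PySem.Set.add (d.getD p.1 []) p.2) := rfl

theorem insert_self_of_get? (d : PySem.Dict String (List String)) (k : String) (v : List String)
    (hn : d.keys.Nodup) (h : d.get? k = some v) : d.insert k v = d := by
  apply PySem.Dict.ext
  have hc : d.contains k = true := by
    rw [PySem.Dict.contains_eq_isSome_get?, h]; rfl
  rw [PySem.Dict.items_insert_of_contains d v hc]
  conv_rhs => rw [← List.map_id d.items]
  apply List.map_congr_left
  intro p hp
  obtain ⟨pk, pv⟩ := p
  by_cases hk : (pk == k) = true
  · have hk' : pk = k := by simpa using hk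
    have hget : d.get? pk = some pv := PySem.Dict.get?_of_mem_items d hp hn
    rw [hk'] at hget
    rw [h] at hget
    have hv : v = pv := Option.some_inj.mp hget
    simp [hk', hv]
  · simp [hk]

-- A's step is the pair step on the row's pair (or the identity), given nodup keys
theorem stepA_eq_stepP (d : PySem.Dict String (List String)) (row : List (String × String))
    (hn : d.keys.Nodup) :
    stepA d row = (match rowPair row with
      | none => d
      | some p => stepP d p) := by
  unfold stepA rowPair
  cases (PySem.Dict.mk row).get? "wrap_group" with
  | none => rfl
  | some wg =>
    by_cases he : wg = ""
    · simp [he]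
    · simp only [if_neg he]
      rw [stepP_eq_insert]
      set sn := ((PySem.Dict.mk row).get? "sample_name").getD "" with hsn
      show (match d.get? wg with
        | none => d.insert wg [sn]
        | some names => if sn ∈ names then d else d.insert wg (names ++ [sn]))
        = d.insert wg (PySem.Set.add (d.getD wg []) sn)
      cases hg : d.get? wg with
      | none =>
        simp only [PySem.Dict.getD_eq_get?_getD, hg]
        rfl
      | some names =>
        simp only [PySem.Dict.getD_eq_get?_getD, hg, Option.getD_some]
        have hadd : PySem.Set.add names sn = if sn ∈ names then names else names ++ [sn] := by
          simp [PySem.Set.add, PySem.Set.contains]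
        rw [hadd]
        by_cases hm : sn ∈ names
        · rw [if_pos hm]
          show d = d.insert wg (if sn ∈ names then names else names ++ [sn])
          rw [if_pos hm]
          exact (insert_self_of_get? d wg names hn hg).symm
        · rw [if_neg hm]
          show d.insert wg (names ++ [sn]) = d.insert wg (if sn ∈ names then names else names ++ [sn])
          rw [if_neg hm]

theorem nodup_keys_stepP (d : PySem.Dict String (List String)) (p : String × String)
    (hn : d.keys.Nodup) : (stepP d p).keys.Nodup := by
  rw [stepP_eq_insert]
  exact PySem.Dict.nodup_keys_insert _ _ _ hn

theorem nodup_keys_foldl_stepP (ps : List (String × String)) (d : PySem.Dict String (List String))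
    (hn : d.keys.Nodup) : (ps.foldl stepP d).keys.Nodup := by
  induction ps generalizing d with
  | nil => exact hn
  | cons p rest ih => exact ih _ (nodup_keys_stepP d p hn)

-- A's row loop equals the pair-level loop over the flattened pair list
theorem foldlA_eq_foldlP (L : List (List (String × String))) :
    ∀ d : PySem.Dict String (List String), d.keys.Nodup →
      L.foldl stepA d = (L.filterMap rowPair).foldl stepP d := by
  induction L with
  | nil => intro d _; rfl
  | cons row rest ih =>
    intro d hn
    rw [List.foldl_cons, List.filterMap_cons, stepA_eq_stepP d row hn]
    cases rowPair row with
    | none => exact ih d hn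
    | some p =>
      rw [List.foldl_cons]
      exact ih _ (nodup_keys_stepP d p hn)

-- the value stored at k after the pair loop: set-update with the names filed under k
theorem getD_foldl_stepP (ps : List (String × String)) (d : PySem.Dict String (List String))
    (k : String) :
    (ps.foldl stepP d).getD k [] =
      PySem.Set.update (d.getD k []) ((ps.filter (fun q => q.1 == k)).map Prod.snd) := by
  induction ps generalizing d with
  | nil => rfl
  | cons p rest ih =>
    rw [List.foldl_cons, ih]
    by_cases hk : p.1 = k
    · have h1 : (stepP d p).getD k [] = PySem.Set.add (d.getD k []) p.2 := by
        rw [stepP_eq_insert, hk, PySem.Dict.getD_insert_self]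
      rw [h1]
      simp [hk, PySem.Set.update]
    · have h1 : (stepP d p).getD k [] = d.getD k [] := by
        rw [stepP_eq_insert, PySem.Dict.getD_insert, if_neg (Ne.symm hk)]
      rw [h1]
      have h2 : (p.1 == k) = false := by simpa using hk
      simp [h2]

-- ===== VERDICT (by name: the statement is the Claim_ definition above) =====
theorem get_wrap_groups_spec : Claim_equal_get_wrap_groups := by
  intro L _ _
  show (L.foldl stepA PySem.Dict.empty).items = _
  rw [foldlA_eq_foldlP L PySem.Dict.empty PySem.Dict.nodup_keys_empty]
  set ps := L.filterMap rowPair with hps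
  have hnd : ((ps.foldl stepP PySem.Dict.empty).keys).Nodup :=
    nodup_keys_foldl_stepP ps _ PySem.Dict.nodup_keys_empty
  rw [PySem.Dict.items_eq_map_keys _ hnd []]
  have hkeys : (ps.foldl stepP PySem.Dict.empty).keys = PySem.List.dedup (ps.map Prod.fst) := by
    show ((ps.foldl (fun d p => d.insert p.1 (PySem.Set.add (d.getD p.1 []) p.2))
      PySem.Dict.empty).keys) = _
    rw [PySem.Dict.keys_foldl_insert_key ps Prod.fst
      (fun d p => PySem.Set.add (d.getD p.1 []) p.2) PySem.Dict.empty,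
      PySem.List.dedup_eq_ofList]
    rfl
  rw [hkeys]
  show _ = get_wrap_groups_alt L
  unfold get_wrap_groups_alt
  rw [← hps]
  apply List.map_congr_left
  intro k _
  rw [getD_foldl_stepP, PySem.List.dedup_eq_ofList]
  rfl
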